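-- pv_equiv track=rewrite | github.com/killmongerinheret-beep/wondersofrome_app | tools/cleanup_colosseum.py | remove_consecutive_repetitions
-- ===== SOURCE A (Python) =====
-- def remove_consecutive_repetitions(text: str, min_repeats: int = 3) -> str:
--     """Remove phrases that repeat consecutively"""
--     sentences = text.split('. ')
--     cleaned = []
--     prev_sentence = None
--     repeat_count = 0
--
--     for sentence in sentences:
--         sentence = sentence.strip()
--         if not sentence:
--             continue
--
--         if sentence == prev_sentence:
--             repeat_count += 1
--             if repeat_count < min_repeats:
--                 cleaned.append(sentence)
--         else:
--             repeat_count = 0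
--             cleaned.append(sentence)
--             prev_sentence = sentence
--
--     return '. '.join(cleaned)
-- ===== SOURCE B (Python) =====
-- def remove_consecutive_repetitions(text: str, min_repeats: int = 3) -> str:
--     """Remove phrases that repeat consecutively (run-length grouping)."""
--     cap = max(1, min_repeats)
--     items = [s.strip() for s in text.split('. ') if s.strip()]
--     out = []
--     i = 0
--     n = len(items)
--     while i < n:
--         j = i
--         while j < n and items[j] == items[i]:
--             j += 1
--         out.extend([items[i]] * min(j - i, cap))
--         i = j
--     return '. '.join(out)
-- ===== Notes on version B (the rewrite author's own statement) =====
-- stated objective: idiomatic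
-- what changed: Replaces A's prev/repeat_count state machine with a filter-first pipeline that run-length groups consecutive equal sentences and caps each run at max(1, min_repeats) copies.
import Mathlib
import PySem

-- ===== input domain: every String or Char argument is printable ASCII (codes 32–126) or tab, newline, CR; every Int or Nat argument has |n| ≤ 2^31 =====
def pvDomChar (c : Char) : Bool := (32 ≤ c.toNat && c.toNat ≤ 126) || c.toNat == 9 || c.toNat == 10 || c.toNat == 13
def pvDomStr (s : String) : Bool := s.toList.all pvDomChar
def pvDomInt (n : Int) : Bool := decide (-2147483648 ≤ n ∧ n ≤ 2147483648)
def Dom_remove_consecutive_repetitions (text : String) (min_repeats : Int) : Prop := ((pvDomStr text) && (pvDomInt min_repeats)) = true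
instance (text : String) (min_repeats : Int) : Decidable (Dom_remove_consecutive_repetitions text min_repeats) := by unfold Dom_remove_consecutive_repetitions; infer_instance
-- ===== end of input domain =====

-- B replaces A's prev/repeat_count state machine with a filter-then-group run-length pipeline (objective: more idiomatic; same cost).

-- ===== PORT A =====
-- the for-loop of A: state (cleaned, prev_sentence, repeat_count), one step per sentence
def pvALoop (mr : Int) : List (List Char) → List (List Char) → Option (List Char) → Int → List (List Char)
  | cleaned, [], _, _ => cleaned
  | cleaned, s :: rest, prev, cnt =>
    let s' := PySem.Chars.strip s
    if s' = [] then pvALoop mr cleaned rest prev cnt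
    else if some s' = prev then
      if cnt + 1 < mr then pvALoop mr (cleaned ++ [s']) rest prev (cnt + 1)
      else pvALoop mr cleaned rest prev (cnt + 1)
    else pvALoop mr (cleaned ++ [s']) rest (some s') 0

def remove_consecutive_repetitions (text : String) (min_repeats : Int) : String :=
  String.ofList (PySem.Chars.join ". ".toList
    (pvALoop min_repeats [] (PySem.Chars.splitOn text.toList ". ".toList) none 0))

-- ===== PORT B =====
-- Source B's while loop: scan the run of sentences equal to items[i] (indices i..j), keep at most cap copies, continue at j
def pvBRuns (cap : Nat) : List (List Char) → List (List Char)
  | [] => []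
  | h :: t =>
    List.replicate (min (1 + (t.takeWhile (· == h)).length) cap) h ++ pvBRuns cap (t.dropWhile (· == h))
termination_by l => l.length
decreasing_by simpa using Nat.lt_succ_of_le (List.length_dropWhile_le _ _)

def remove_consecutive_repetitions_alt (text : String) (min_repeats : Int) : String :=
  String.ofList (PySem.Chars.join ". ".toList (pvBRuns (max 1 min_repeats).toNat
    (((PySem.Chars.splitOn text.toList ". ".toList).map PySem.Chars.strip).filter
      (fun s => s != []))))

-- ===== PRECONDITION & SPEC =====
def Spec_remove_consecutive_repetitions (text : String) (min_repeats : Int) (out : String) : Prop := out = remove_consecutive_repetitions_alt text min_repeats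
instance (text : String) (min_repeats : Int) (out : String) : Decidable (Spec_remove_consecutive_repetitions text min_repeats out) := by unfold Spec_remove_consecutive_repetitions; infer_instance

-- ===== CLAIM (what is proved, stated in full; the proofs are below) =====
def Claim_equal_remove_consecutive_repetitions : Prop := ∀ (text : String) (min_repeats : Int), Dom_remove_consecutive_repetitions text min_repeats → Spec_remove_consecutive_repetitions text min_repeats (remove_consecutive_repetitions text min_repeats)

-- ===== LEMMAS AND PROOFS =====

theorem pvBRuns_nil (cap : Nat) : pvBRuns cap [] = [] := by
  rw [pvBRuns]

theorem pvBRuns_cons (cap : Nat) (h : List Char) (t : List (List Char)) :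
    pvBRuns cap (h :: t)
      = List.replicate (min (1 + (t.takeWhile (· == h)).length) cap) h
          ++ pvBRuns cap (t.dropWhile (· == h)) := by
  rw [pvBRuns]

-- A's loop over the pre-stripped, pre-filtered item list (strip/skip-empty removed)
def pvALoop2 (mr : Int) : List (List Char) → List (List Char) → Option (List Char) → Int → List (List Char)
  | cleaned, [], _, _ => cleaned
  | cleaned, s :: rest, prev, cnt =>
    if some s = prev then
      if cnt + 1 < mr then pvALoop2 mr (cleaned ++ [s]) rest prev (cnt + 1)
      else pvALoop2 mr cleaned rest prev (cnt + 1)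
    else pvALoop2 mr (cleaned ++ [s]) rest (some s) 0

-- Lemma 1: A's loop equals the loop over the filtered stripped items
theorem pvALoop_eq_loop2 (mr : Int) (ss : List (List Char)) :
    ∀ (cleaned : List (List Char)) (prev : Option (List Char)) (cnt : Int),
    pvALoop mr cleaned ss prev cnt
      = pvALoop2 mr cleaned ((ss.map PySem.Chars.strip).filter (fun s => s != [])) prev cnt := by
  induction ss with
  | nil => intro cleaned prev cnt; rfl
  | cons s rest ih =>
    intro cleaned prev cnt
    by_cases h : PySem.Chars.strip s = []
    · simp [pvALoop, h, ih]
    · simp only [pvALoop, List.map_cons, List.filter_cons]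
      simp only [bne_iff_ne, ne_eq, h, not_false_eq_true, if_pos]
      by_cases hp : some (PySem.Chars.strip s) = prev
      · by_cases hc : cnt + 1 < mr <;> simp [pvALoop2, hp, hc, ih]
      · simp [pvALoop2, hp, ih]

-- Lemma 2: processing a block of sentences all equal to the current prev p
theorem pvALoop2_run (mr : Int) (p : List Char) : ∀ (l : List (List Char)), (∀ x ∈ l, x = p) →
    ∀ (cleaned rest : List (List Char)) (cnt : Int),
    pvALoop2 mr cleaned (l ++ rest) (some p) cnt
      = pvALoop2 mr (cleaned ++ List.replicate (min l.length (mr - cnt - 1).toNat) p)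
          rest (some p) (cnt + l.length) := by
  intro l
  induction l with
  | nil => intro _ cleaned rest cnt; simp
  | cons x t ih =>
    intro hall cleaned rest cnt
    have hx : x = p := hall x (List.mem_cons_self ..)
    subst hx
    have ht : ∀ y ∈ t, y = x := fun y hy => hall y (List.mem_cons_of_mem _ hy)
    rw [List.cons_append, pvALoop2, if_pos rfl]
    by_cases hc : cnt + 1 < mr
    · rw [if_pos hc, ih ht]
      have hm : min (t.length + 1) (mr - cnt - 1).toNat
          = min t.length (mr - (cnt + 1) - 1).toNat + 1 := by omega
      congr 1
      · rw [List.length_cons, hm, List.replicate_succ, List.append_assoc, List.singleton_append]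
      · rw [List.length_cons]
        push_cast
        ring
    · rw [if_neg hc, ih ht]
      have h1 : min t.length (mr - (cnt + 1) - 1).toNat = 0 := by omega
      have h2 : min (t.length + 1) (mr - cnt - 1).toNat = 0 := by omega
      congr 1
      · rw [List.length_cons, h1, h2, List.replicate_zero]
      · rw [List.length_cons]
        push_cast
        ring

-- Lemma 3: from a fresh state (just appended h, prev = h, count 0) A's loop produces B's runs
theorem pvALoop2_fresh (mr : Int) : ∀ (n : Nat) (items : List (List Char)), items.length ≤ n →
    ∀ (h : List Char) (cleaned : List (List Char)),
    pvALoop2 mr (cleaned ++ [h]) items (some h) 0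
      = cleaned ++ pvBRuns (max 1 mr).toNat (h :: items) := by
  intro n
  induction n with
  | zero =>
    intro items hlen h cleaned
    have hnil : items = [] := List.eq_nil_of_length_eq_zero (Nat.le_zero.mp hlen)
    subst hnil
    have h1 : min (1 + ([].takeWhile (· == h)).length) (max 1 mr).toNat = 1 := by
      simp only [List.takeWhile_nil, List.length_nil, Nat.add_zero]
      omega
    rw [pvBRuns_cons, h1]
    simp [pvALoop2, pvBRuns_nil]
  | succ n ih =>
    intro items hlen h cleaned
    have hall : ∀ x ∈ items.takeWhile (· == h), x = h := by
      intro x hx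
      have := List.mem_takeWhile_imp hx
      simpa using this
    rw [pvBRuns_cons]
    conv_lhs => rw [← List.takeWhile_append_dropWhile (p := (· == h)) (l := items)]
    rw [pvALoop2_run mr h _ hall]
    have hm : min (items.takeWhile (· == h)).length (mr - 0 - 1).toNat + 1
        = min (1 + (items.takeWhile (· == h)).length) (max 1 mr).toNat := by omega
    have hacc : (cleaned ++ [h])
          ++ List.replicate (min (items.takeWhile (· == h)).length (mr - 0 - 1).toNat) h
        = cleaned ++ List.replicate
            (min (1 + (items.takeWhile (· == h)).length) (max 1 mr).toNat) h := by
      rw [← hm, List.replicate_succ, List.append_assoc, List.singleton_append]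
    rw [hacc]
    rcases hdw : items.dropWhile (· == h) with _ | ⟨d, t⟩
    · rw [pvBRuns_nil, List.append_nil]
      simp [pvALoop2]
    · have hd : ¬ some d = some h := by
        have hh := List.head?_dropWhile_not (p := (· == h)) (l := items)
        rw [hdw] at hh
        simp at hh
        simpa using hh
      have hlt : t.length ≤ n := by
        have h1 : (items.dropWhile (· == h)).length ≤ items.length := List.length_dropWhile_le _ _
        rw [hdw] at h1
        simp at h1
        omega
      rw [pvALoop2, if_neg hd, ← List.append_assoc, ih t hlt d _, List.append_assoc]

-- ===== VERDICT (by name: the statement is the Claim_ definition above) =====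
theorem remove_consecutive_repetitions_spec : Claim_equal_remove_consecutive_repetitions := by
  intro text mr _
  unfold Spec_remove_consecutive_repetitions
  unfold remove_consecutive_repetitions remove_consecutive_repetitions_alt
  rw [pvALoop_eq_loop2]
  rcases hitems : ((PySem.Chars.splitOn text.toList ". ".toList).map PySem.Chars.strip).filter
      (fun s => s != []) with _ | ⟨h, t⟩
  · simp [pvALoop2, pvBRuns_nil]
  · have hne : ¬ some h = (none : Option (List Char)) := by simp
    have hfresh := pvALoop2_fresh mr t.length t (le_refl _) h []
    simp only [List.nil_append] at hfresh
    rw [pvALoop2, if_neg hne, List.nil_append, hfresh]
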